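-- pv_equiv track=rewrite | github.com/dokyung36d/programmersCodingTest | 2023 KAKAO BLIND RECRUITMENT 택배 배달과 수거하기.py | get_prev_index_which_not_zero
-- ===== SOURCE A (Python) =====
-- def get_prev_index_which_not_zero(list1 : list, index):
--     if index == 0:
--         return -1
--
--     index -= 1
--
--     while index >= 0:
--         if list1[index] != 0:
--             return index
--         index -= 1
--
--     return -1
-- ===== SOURCE B (Python) =====
-- def get_prev_index_which_not_zero(list1: list, index):
--     return max((i for i in range(index) if list1[i] != 0), default=-1)
-- ===== Notes on version B (the rewrite author's own statement) =====
-- stated objective: idiomatic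
-- what changed: Replaced the backward early-exit while loop with a one-line forward pass that takes the max of all nonzero-valued indices in range(index), default -1.
import Mathlib
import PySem

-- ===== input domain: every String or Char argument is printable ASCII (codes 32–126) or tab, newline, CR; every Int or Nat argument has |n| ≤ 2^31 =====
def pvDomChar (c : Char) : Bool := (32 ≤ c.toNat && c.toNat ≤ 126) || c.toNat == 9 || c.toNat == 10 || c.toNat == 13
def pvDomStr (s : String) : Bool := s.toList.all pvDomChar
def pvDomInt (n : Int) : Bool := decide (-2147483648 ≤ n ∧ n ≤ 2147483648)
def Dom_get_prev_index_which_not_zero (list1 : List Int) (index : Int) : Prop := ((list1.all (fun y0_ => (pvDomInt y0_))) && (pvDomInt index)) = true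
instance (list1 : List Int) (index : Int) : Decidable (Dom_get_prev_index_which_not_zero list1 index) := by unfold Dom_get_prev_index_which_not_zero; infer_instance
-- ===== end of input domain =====

-- B replaces A's backward early-exit scan by a forward pass taking the max qualifying index (idiomatic one-liner, same cost).

-- ===== PORT A =====
-- the 'while index >= 0' loop of A; list1[index] is in range under Pre_, so pyGetD is exact there
def pvWhileA (list1 : List Int) (index : Int) : Int :=
  if _h : 0 ≤ index then
    if PySem.List.pyGetD list1 index 0 ≠ 0 then index
    else pvWhileA list1 (index - 1)
  else -1
termination_by (index + 1).toNat
decreasing_by omega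

def get_prev_index_which_not_zero (list1 : List Int) (index : Int) : Int :=
  if index = 0 then -1
  else pvWhileA list1 (index - 1)

-- ===== PORT B =====
-- max((i for i in range(index) if list1[i] != 0), default=-1)
def get_prev_index_which_not_zero_alt (list1 : List Int) (index : Int) : Int :=
  match PySem.List.max?
      ((PySem.List.pyRange 0 index 1).filter (fun i => PySem.List.pyGetD list1 i 0 ≠ 0))
      (fun x => x) with
  | some m => m
  | none => -1

-- ===== PRECONDITION & SPEC =====
-- Pre_ excludes exactly the inputs where Python A raises IndexError: index > len(list1)
def Pre_get_prev_index_which_not_zero (list1 : List Int) (index : Int) : Prop :=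
  index ≤ (list1.length : Int)
instance (list1 : List Int) (index : Int) : Decidable (Pre_get_prev_index_which_not_zero list1 index) := by unfold Pre_get_prev_index_which_not_zero; infer_instance

def pvWitness_get_prev_index_which_not_zero : List Int × Int := ([1, 0, 2], 2)

def Spec_get_prev_index_which_not_zero (list1 : List Int) (index : Int) (out : Int) : Prop := out = get_prev_index_which_not_zero_alt list1 index
instance (list1 : List Int) (index : Int) (out : Int) : Decidable (Spec_get_prev_index_which_not_zero list1 index out) := by unfold Spec_get_prev_index_which_not_zero; infer_instance

-- ===== CLAIM (what is proved, stated in full; the proofs are below) =====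
def Claim_equal_get_prev_index_which_not_zero : Prop := ∀ (list1 : List Int) (index : Int), Dom_get_prev_index_which_not_zero list1 index → Pre_get_prev_index_which_not_zero list1 index → Spec_get_prev_index_which_not_zero list1 index (get_prev_index_which_not_zero list1 index)

-- ===== LEMMAS AND PROOFS =====

-- one step of B's max? across an appended last element
lemma pvMax?_append_singleton (l : List Int) (n : Int) (h : ∀ x ∈ l, x < n) :
    PySem.List.max? (l ++ [n]) (fun x => x) = some n := by
  rcases hm : PySem.List.max? l (fun x : Int => x) with _ | m
  · have hl : l = [] := (PySem.List.max?_eq_none_iff _ _).mp hm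
    subst hl
    rfl
  · have hlt : m < n := h m (PySem.List.max?_mem hm)
    unfold PySem.List.max? at hm ⊢
    rw [List.foldl_append, hm]
    simp [hlt]

-- A's backward scan from n-1 equals B's forward max over range(n)
lemma pvWhileA_eq_max (list1 : List Int) : ∀ n : Nat,
    pvWhileA list1 ((n : Int) - 1) =
      (match PySem.List.max?
          ((PySem.List.pyRange 0 n 1).filter (fun i => PySem.List.pyGetD list1 i 0 ≠ 0))
          (fun x => x) with
       | some m => m
       | none => -1) := by
  intro n
  induction n with
  | zero =>
      rw [pvWhileA]
      norm_num [PySem.List.pyRange_one_eq_nil]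
      rfl
  | succ k ih =>
      have hcast : ((k + 1 : Nat) : Int) - 1 = (k : Int) := by push_cast; ring
      have hsplit : PySem.List.pyRange 0 ((k + 1 : Nat) : Int) 1 =
          PySem.List.pyRange 0 (k : Int) 1 ++ [(k : Int)] := by
        have : ((k + 1 : Nat) : Int) = (k : Int) + 1 := by push_cast; ring
        rw [this, PySem.List.pyRange_one_succ_right (by positivity)]
      rw [hcast, pvWhileA]
      by_cases hv : PySem.List.pyGetD list1 (k : Int) 0 ≠ 0
      · rw [hsplit, List.filter_append]
        have hlast : List.filter (fun i => PySem.List.pyGetD list1 i 0 ≠ 0) [(k : Int)] = [(k : Int)] := by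
          simpa using hv
        rw [hlast]
        rw [pvMax?_append_singleton _ _ (by
          intro x hx
          have hx' := List.mem_filter.mp hx
          exact ((PySem.List.mem_pyRange_one).mp hx'.1).2)]
        rw [dif_pos (Int.natCast_nonneg k), if_pos hv]
      · rw [hsplit, List.filter_append]
        have hlast : List.filter (fun i => PySem.List.pyGetD list1 i 0 ≠ 0) [(k : Int)] = [] := by
          simp at hv; simp [hv]
        rw [hlast, List.append_nil]
        simp only [hv, if_false, dif_pos (Int.natCast_nonneg k)]
        simpa using ih

-- ===== VERDICT (by name: the statement is the Claim_ definition above) =====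
theorem get_prev_index_which_not_zero_spec : Claim_equal_get_prev_index_which_not_zero := by
  intro list1 index _hdom _hpre
  unfold Spec_get_prev_index_which_not_zero get_prev_index_which_not_zero get_prev_index_which_not_zero_alt
  by_cases h0 : index = 0
  · subst h0
    norm_num [PySem.List.pyRange_one_eq_nil]
    simp [PySem.List.max?]
  · rw [if_neg h0]
    rcases Int.lt_or_le index 0 with hneg | hpos
    · rw [pvWhileA]
      rw [dif_neg (by omega)]
      rw [PySem.List.pyRange_one_eq_nil (by omega)]
      simp [PySem.List.max?]
    · have hn : index = ((index.toNat : Nat) : Int) := by omega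
      rw [hn]
      exact pvWhileA_eq_max list1 index.toNat
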